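-- pv_equiv track=rewrite | github.com/Shengjie-Sun/Github | 1049-Medium-Last Stone Weight II-[DP].py | lastStoneWeightII_neighbor
-- ===== SOURCE A (Python) =====
-- def lastStoneWeightII_neighbor(stones):
--     N = len(stones)
--     # states = [[0]*N]*N This is totally wrong!
--     states = [[0]*N for _ in range(N)]
--     for dif in range(N):
--         for i in range(N-dif):
--             j = i + dif
--             if dif == 0:
--                 states[i][j] = stones[i]
--             else:
--                 states[i][j] = min(abs(states[i][k]-states[k+1][j]) for k in range(i, j))
--     return states
-- ===== SOURCE B (Python) =====
-- def lastStoneWeightII_neighbor(stones):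
--     # Top-down memoized recursion over subintervals instead of A's
--     # bottom-up sweep by increasing interval length.
--     memo = {}
--
--     def solve(i, j):
--         cached = memo.get((i, j))
--         if cached is not None:
--             return cached
--         if i == j:
--             v = stones[i]
--         else:
--             v = None
--             for k in range(i, j):
--                 cand = abs(solve(i, k) - solve(k + 1, j))
--                 if v is None or cand < v:
--                     v = cand
--         memo[(i, j)] = v
--         return v
--
--     N = len(stones)
--     return [[solve(i, j) if i <= j else 0 for j in range(N)] for i in range(N)]
-- ===== Notes on version B (the rewrite author's own statement) =====
-- stated objective: alternative
-- what changed: Replaces the bottom-up diagonal-by-diagonal table sweep with top-down memoized recursion over subintervals (solve(i,j) caching in a dict), building the returned table by querying solve for each i<=j cell.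
import Mathlib
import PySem

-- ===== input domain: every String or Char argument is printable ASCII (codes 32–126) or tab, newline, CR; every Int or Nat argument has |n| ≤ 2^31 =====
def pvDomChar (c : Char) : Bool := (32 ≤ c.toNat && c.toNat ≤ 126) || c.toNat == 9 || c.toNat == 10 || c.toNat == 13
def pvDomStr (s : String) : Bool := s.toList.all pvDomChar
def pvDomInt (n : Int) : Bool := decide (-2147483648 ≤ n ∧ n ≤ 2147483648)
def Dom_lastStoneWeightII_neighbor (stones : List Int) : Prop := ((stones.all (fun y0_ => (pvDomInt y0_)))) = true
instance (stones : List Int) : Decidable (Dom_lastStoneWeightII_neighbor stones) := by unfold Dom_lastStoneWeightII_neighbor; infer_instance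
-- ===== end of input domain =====

-- B replaces A's bottom-up diagonal-sweep DP with top-down memoized recursion over
-- subintervals (objective: alternative decomposition, same values, same asymptotic cost).

-- ===== PORT A =====
-- Python's min(generator) over a non-empty sequence is the running-min loop
-- (PySem.List.min?_id_cons); the [] branch is unreachable in A (dif ≥ 1 ⇒ range(i,j) non-empty,
-- where Python's min would raise on empty input; it never does here).
def pvMinFold : List Int → Int
  | [] => 0
  | x :: t => t.foldl min x

-- inner loop body of A: states[i][j] = … (indices produced by range(…) are always in range,
-- so pyGetD/pySetD are exact here)
def pvBodyA (stones : List Int) (dif : Int) (states : List (List Int)) (i : Int) :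
    List (List Int) :=
  let j := i + dif
  let v : Int :=
    if dif = 0 then PySem.List.pyGetD stones i 0
    else pvMinFold ((PySem.List.pyRange i j 1).map (fun k =>
      |PySem.List.pyGetD (PySem.List.pyGetD states i []) k 0 -
       PySem.List.pyGetD (PySem.List.pyGetD states (k + 1) []) j 0|))
  PySem.List.pySetD states i
    (PySem.List.pySetD (PySem.List.pyGetD states i []) j v)

-- one outer iteration of A: 'for i in range(N - dif): …'
def pvOuterA (stones : List Int) (states : List (List Int)) (dif : Int) :
    List (List Int) :=
  (PySem.List.pyRange 0 ((stones.length : Int) - dif) 1).foldl (pvBodyA stones dif) states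

def lastStoneWeightII_neighbor (stones : List Int) : List (List Int) :=
  let N : Int := stones.length
  let states : List (List Int) :=
    List.replicate stones.length (List.replicate stones.length (0 : Int))
  (PySem.List.pyRange 0 N 1).foldl (pvOuterA stones) states

-- ===== PORT B =====
-- B's recursive helper solve(i, j) with the memo dict threaded through; fuel = j - i bounds
-- the recursion depth (the fuel-0/i≠j branch is unreachable: every call has fuel ≥ j - i).
def pvSolveB (stones : List Int) :
    Nat → Int → Int → PySem.Dict (Int × Int) Int → Int × PySem.Dict (Int × Int) Int
  | fuel, i, j, memo =>
    match memo.get? (i, j) with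
    | some v => (v, memo)
    | none =>
      if i = j then
        let v := PySem.List.pyGetD stones i 0
        (v, memo.insert (i, j) v)
      else
        match fuel with
        | 0 => (0, memo)
        | fuel' + 1 =>
          let r := (PySem.List.pyRange i j 1).foldl
            (fun (st : Option Int × PySem.Dict (Int × Int) Int) k =>
              let p1 := pvSolveB stones fuel' i k st.2
              let p2 := pvSolveB stones fuel' (k + 1) j p1.2
              let cand := |p1.1 - p2.1|
              (match st.1 with
               | none => some cand
               | some v => if cand < v then some cand else some v, p2.2))
            (none, memo)
          let v := r.1.getD 0
          (v, r.2.insert (i, j) v)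

def lastStoneWeightII_neighbor_alt (stones : List Int) : List (List Int) :=
  let N : Int := stones.length
  let res := (PySem.List.pyRange 0 N 1).foldl
    (fun (st : PySem.Dict (Int × Int) Int × List (List Int)) i =>
      let row := (PySem.List.pyRange 0 N 1).foldl
        (fun (st2 : PySem.Dict (Int × Int) Int × List Int) j =>
          if i ≤ j then
            let p := pvSolveB stones (j - i).toNat i j st2.1
            (p.2, st2.2 ++ [p.1])
          else (st2.1, st2.2 ++ [(0 : Int)]))
        (st.1, [])
      (row.1, st.2 ++ [row.2]))
    (PySem.Dict.empty, [])
  res.2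

-- ===== PRECONDITION & SPEC =====
def Spec_lastStoneWeightII_neighbor (stones : List Int) (out : List (List Int)) : Prop := out = lastStoneWeightII_neighbor_alt stones
instance (stones : List Int) (out : List (List Int)) : Decidable (Spec_lastStoneWeightII_neighbor stones out) := by unfold Spec_lastStoneWeightII_neighbor; infer_instance

-- ===== CLAIM (what is proved, stated in full; the proofs are below) =====
def Claim_equal_lastStoneWeightII_neighbor : Prop := ∀ (stones : List Int), Dom_lastStoneWeightII_neighbor stones → Spec_lastStoneWeightII_neighbor stones (lastStoneWeightII_neighbor stones)

-- ===== LEMMAS AND PROOFS =====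

def fval (stones : List Int) (g : Nat) (i : Int) : Int :=
  if g = 0 then PySem.List.pyGetD stones i 0
  else pvMinFold ((List.range g).attach.map (fun t =>
    |fval stones t.1 i - fval stones (g - 1 - t.1) (i + (t.1 : Int) + 1)|))
termination_by g
decreasing_by
  · exact List.mem_range.mp t.2
  · have := List.mem_range.mp t.2; omega

theorem fval_zero (stones : List Int) (i : Int) :
    fval stones 0 i = PySem.List.pyGetD stones i 0 := by
  rw [fval]; simp

theorem fval_pos (stones : List Int) {g : Nat} (hg : g ≠ 0) (i : Int) :
    fval stones g i = pvMinFold ((List.range g).map (fun t =>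
      |fval stones t i - fval stones (g - 1 - t) (i + (t : Int) + 1)|)) := by
  rw [fval, if_neg hg]
  congr 1
  exact List.attach_map_val (l := List.range g)
    (f := fun t => |fval stones t i - fval stones (g - 1 - t) (i + (t : Int) + 1)|)

theorem fval_pyRange (stones : List Int) {g : Nat} (hg : g ≠ 0) (i : Int) :
    fval stones g i = pvMinFold ((PySem.List.pyRange i (i + (g : Int)) 1).map (fun k =>
      |fval stones (k - i).toNat i - fval stones ((i + (g : Int)) - k - 1).toNat (k + 1)|)) := by
  rw [fval_pos stones hg i, PySem.List.pyRange_one, List.map_map]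
  have hgg : ((i + (g : Int)) - i).toNat = g := by omega
  rw [hgg]
  congr 1
  apply List.map_congr_left
  intro t ht
  have ht' := List.mem_range.mp ht
  simp only [Function.comp]
  have h1 : ((i + (t : Int)) - i).toNat = t := by omega
  have h2 : ((i + (g : Int)) - (i + (t : Int)) - 1).toNat = g - 1 - t := by omega
  rw [h1, h2]

theorem optMinFold (l : List Int) (a : Int) :
    l.foldl (fun (o : Option Int) c =>
        match o with
        | none => some c
        | some v => if c < v then some c else some v) (some a)
      = some (l.foldl min a) := by
  induction l generalizing a with
  | nil => rfl
  | cons c l ih =>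
    simp only [List.foldl]
    have h : (if c < a then some c else some a) = some (min a c) := by
      rw [min_def]; split_ifs <;> simp only [Option.some.injEq] <;> omega
    rw [h, ih]

def MemoInv (stones : List Int) (memo : PySem.Dict (Int × Int) Int) : Prop :=
  ∀ a b v : Int, memo.get? (a, b) = some v →
    0 ≤ a ∧ a ≤ b ∧ v = fval stones ((b - a).toNat) a

theorem memoInv_insert (stones : List Int) {memo : PySem.Dict (Int × Int) Int}
    (hm : MemoInv stones memo) {i j : Int} (hi : 0 ≤ i) (hij : i ≤ j) {v : Int}
    (hv : v = fval stones ((j - i).toNat) i) :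
    MemoInv stones (memo.insert (i, j) v) := by
  intro a b w hw
  rw [PySem.Dict.get?_insert] at hw
  by_cases hab : (a, b) = (i, j)
  · rw [if_pos hab] at hw
    obtain ⟨ha, hb⟩ := Prod.mk.injEq .. ▸ hab
    subst ha; subst hb
    injection hw with hw'
    exact ⟨hi, hij, by rw [← hw', hv]⟩
  · rw [if_neg hab] at hw
    exact hm a b w hw

theorem solveB_correct (stones : List Int) :
    ∀ fuel : Nat, ∀ i j : Int, ∀ memo, 0 ≤ i → i ≤ j → (j - i).toNat ≤ fuel →
      MemoInv stones memo →
      (pvSolveB stones fuel i j memo).1 = fval stones ((j - i).toNat) i ∧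
      MemoInv stones (pvSolveB stones fuel i j memo).2 := by
  intro fuel
  induction fuel with
  | zero =>
    intro i j memo hi hij hf hm
    have hij0 : i = j := by omega
    rw [pvSolveB]
    cases hget : memo.get? (i, j) with
    | some v =>
      obtain ⟨-, -, hv⟩ := hm i j v hget
      exact ⟨by simp [hv], hm⟩
    | none =>
      simp only [if_pos hij0]
      rw [← hij0]
      refine ⟨by simp [fval_zero], ?_⟩
      exact memoInv_insert stones hm hi (le_refl i) (by simp [fval_zero])
  | succ fuel' ih =>
    intro i j memo hi hij hf hm
    rw [pvSolveB]
    cases hget : memo.get? (i, j) with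
    | some v =>
      obtain ⟨-, -, hv⟩ := hm i j v hget
      exact ⟨by simp [hv], hm⟩
    | none =>
      by_cases hij' : i = j
      · simp only [if_pos hij']
        rw [← hij']
        refine ⟨by simp [fval_zero], ?_⟩
        exact memoInv_insert stones hm hi (le_refl i) (by simp [fval_zero])
      · have hlt : i < j := lt_of_le_of_ne hij hij'
        simp only [if_neg hij']
        have fold : ∀ ks : List Int, (∀ k ∈ ks, i ≤ k ∧ k < j) →
            ∀ (o : Option Int) (m : PySem.Dict (Int × Int) Int), MemoInv stones m →
            MemoInv stones ((ks.foldl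
              (fun (st : Option Int × PySem.Dict (Int × Int) Int) k =>
                let p1 := pvSolveB stones fuel' i k st.2
                let p2 := pvSolveB stones fuel' (k + 1) j p1.2
                let cand := |p1.1 - p2.1|
                (match st.1 with
                 | none => some cand
                 | some v => if cand < v then some cand else some v, p2.2)) (o, m)).2) ∧
            (ks.foldl
              (fun (st : Option Int × PySem.Dict (Int × Int) Int) k =>
                let p1 := pvSolveB stones fuel' i k st.2
                let p2 := pvSolveB stones fuel' (k + 1) j p1.2
                let cand := |p1.1 - p2.1|
                (match st.1 with
                 | none => some cand
                 | some v => if cand < v then some cand else some v, p2.2)) (o, m)).1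
              = (ks.map (fun k =>
                  |fval stones ((k - i).toNat) i - fval stones ((j - k - 1).toNat) (k + 1)|)).foldl
                  (fun (o : Option Int) c =>
                    match o with
                    | none => some c
                    | some v => if c < v then some c else some v) o := by
          intro ks
          induction ks with
          | nil => intro _ o m hacc; exact ⟨hacc, rfl⟩
          | cons k ks ihk =>
            intro hks o m hacc
            obtain ⟨hk1, hk2⟩ := hks k List.mem_cons_self
            have hks' := fun x hx => hks x (List.mem_cons_of_mem _ hx)
            have h1 := ih i k m hi hk1 (by omega) hacc
            have h2 := ih (k + 1) j (pvSolveB stones fuel' i k m).2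
              (by omega) (by omega) (by omega) h1.2
            have h21 := h2.1
            rw [show j - (k + 1) = j - k - 1 by ring] at h21
            simp only [List.foldl_cons, List.map_cons]
            have hstep := ihk hks'
              (match o with
               | none => some |(pvSolveB stones fuel' i k m).1 -
                   (pvSolveB stones fuel' (k + 1) j (pvSolveB stones fuel' i k m).2).1|
               | some v => if |(pvSolveB stones fuel' i k m).1 -
                   (pvSolveB stones fuel' (k + 1) j (pvSolveB stones fuel' i k m).2).1| < v
                 then some |(pvSolveB stones fuel' i k m).1 -
                   (pvSolveB stones fuel' (k + 1) j (pvSolveB stones fuel' i k m).2).1|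
                 else some v)
              (pvSolveB stones fuel' (k + 1) j (pvSolveB stones fuel' i k m).2).2 h2.2
            refine ⟨hstep.1, Eq.trans (by exact hstep.2) ?_⟩
            congr 1
            cases o <;> simp only [h1.1, h21]
        have hne : i < j := hlt
        have F := fold (PySem.List.pyRange i j 1)
          (fun k hk => PySem.List.mem_pyRange_one.mp hk) none memo hm
        have hg0 : (j - i).toNat ≠ 0 := by omega
        have hij2 : i + (((j - i).toNat : Nat) : Int) = j := by omega
        have hval : ((PySem.List.pyRange i j 1).foldl
              (fun (st : Option Int × PySem.Dict (Int × Int) Int) k =>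
                let p1 := pvSolveB stones fuel' i k st.2
                let p2 := pvSolveB stones fuel' (k + 1) j p1.2
                let cand := |p1.1 - p2.1|
                (match st.1 with
                 | none => some cand
                 | some v => if cand < v then some cand else some v, p2.2)) (none, memo)).1.getD 0
            = fval stones ((j - i).toNat) i := by
          rw [F.2]
          rw [fval_pyRange stones hg0 i, hij2]
          rcases hl : (PySem.List.pyRange i j 1).map (fun k =>
              |fval stones ((k - i).toNat) i - fval stones ((j - k - 1).toNat) (k + 1)|) with _ | ⟨c, cs⟩
          · exfalso
            have : (PySem.List.pyRange i j 1) = [] := by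
              cases hpr : PySem.List.pyRange i j 1 with
              | nil => rfl
              | cons x xs => rw [hpr] at hl; simp at hl
            rw [PySem.List.pyRange_one_cons hlt] at this
            simp at this
          · simp only [List.foldl_cons, optMinFold]
            rfl
        refine ⟨hval, ?_⟩
        exact memoInv_insert stones F.1 hi hij hval

def mkTable (stones : List Int) : List (List Int) :=
  (List.range stones.length).map (fun i => (List.range stones.length).map (fun j =>
    if i ≤ j then fval stones (j - i) (i : Int) else 0))

theorem memoInv_empty (stones : List Int) : MemoInv stones PySem.Dict.empty := by
  intro a b v h
  rw [PySem.Dict.get?_empty] at h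
  cases h

theorem rowB (stones : List Int) (i : Int) (hi : 0 ≤ i) :
    ∀ ks : List Int, ∀ (m : PySem.Dict (Int × Int) Int) (acc : List Int), MemoInv stones m →
    MemoInv stones ((ks.foldl (fun (st2 : PySem.Dict (Int × Int) Int × List Int) j =>
        if i ≤ j then
          let p := pvSolveB stones (j - i).toNat i j st2.1
          (p.2, st2.2 ++ [p.1])
        else (st2.1, st2.2 ++ [(0 : Int)])) (m, acc)).1) ∧
    ((ks.foldl (fun (st2 : PySem.Dict (Int × Int) Int × List Int) j =>
        if i ≤ j then
          let p := pvSolveB stones (j - i).toNat i j st2.1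
          (p.2, st2.2 ++ [p.1])
        else (st2.1, st2.2 ++ [(0 : Int)])) (m, acc)).2
      = acc ++ ks.map (fun j => if i ≤ j then fval stones ((j - i).toNat) i else 0)) := by
  intro ks
  induction ks with
  | nil => intro m acc hm; exact ⟨hm, by simp⟩
  | cons j ks ihr =>
    intro m acc hm
    simp only [List.foldl_cons, List.map_cons]
    by_cases hij : i ≤ j
    · simp only [if_pos hij]
      have hs := solveB_correct stones ((j - i).toNat) i j m hi hij (le_refl _) hm
      have hr := ihr (pvSolveB stones ((j - i).toNat) i j m).2
        (acc ++ [(pvSolveB stones ((j - i).toNat) i j m).1]) hs.2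
      refine ⟨hr.1, ?_⟩
      rw [hr.2, hs.1, List.append_assoc]
      rfl
    · simp only [if_neg hij]
      have hr := ihr m (acc ++ [(0 : Int)]) hm
      refine ⟨hr.1, ?_⟩
      rw [hr.2, List.append_assoc]
      rfl

theorem outerB (stones : List Int) :
    ∀ is : List Int, (∀ i ∈ is, 0 ≤ i) →
    ∀ (m : PySem.Dict (Int × Int) Int) (acc : List (List Int)), MemoInv stones m →
    MemoInv stones ((is.foldl
      (fun (st : PySem.Dict (Int × Int) Int × List (List Int)) i =>
        let row := (PySem.List.pyRange 0 ((stones.length : Nat) : Int) 1).foldl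
          (fun (st2 : PySem.Dict (Int × Int) Int × List Int) j =>
            if i ≤ j then
              let p := pvSolveB stones (j - i).toNat i j st2.1
              (p.2, st2.2 ++ [p.1])
            else (st2.1, st2.2 ++ [(0 : Int)]))
          (st.1, [])
        (row.1, st.2 ++ [row.2])) (m, acc)).1) ∧
    ((is.foldl
      (fun (st : PySem.Dict (Int × Int) Int × List (List Int)) i =>
        let row := (PySem.List.pyRange 0 ((stones.length : Nat) : Int) 1).foldl
          (fun (st2 : PySem.Dict (Int × Int) Int × List Int) j =>
            if i ≤ j then
              let p := pvSolveB stones (j - i).toNat i j st2.1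
              (p.2, st2.2 ++ [p.1])
            else (st2.1, st2.2 ++ [(0 : Int)]))
          (st.1, [])
        (row.1, st.2 ++ [row.2])) (m, acc)).2
      = acc ++ is.map (fun i => (PySem.List.pyRange 0 ((stones.length : Nat) : Int) 1).map
          (fun j => if i ≤ j then fval stones ((j - i).toNat) i else 0))) := by
  intro is
  induction is with
  | nil => intro _ m acc hm; exact ⟨hm, by simp⟩
  | cons i is ihs =>
    intro his m acc hm
    have hi : 0 ≤ i := his i List.mem_cons_self
    simp only [List.foldl_cons, List.map_cons]
    have hrow := rowB stones i hi (PySem.List.pyRange 0 ((stones.length : Nat) : Int) 1) m [] hm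
    have hs := ihs (fun x hx => his x (List.mem_cons_of_mem _ hx))
      ((PySem.List.pyRange 0 ((stones.length : Nat) : Int) 1).foldl
        (fun (st2 : PySem.Dict (Int × Int) Int × List Int) j =>
          if i ≤ j then
            let p := pvSolveB stones (j - i).toNat i j st2.1
            (p.2, st2.2 ++ [p.1])
          else (st2.1, st2.2 ++ [(0 : Int)])) (m, [])).1 (acc ++ [((PySem.List.pyRange 0 ((stones.length : Nat) : Int) 1).foldl
        (fun (st2 : PySem.Dict (Int × Int) Int × List Int) j =>
          if i ≤ j then
            let p := pvSolveB stones (j - i).toNat i j st2.1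
            (p.2, st2.2 ++ [p.1])
          else (st2.1, st2.2 ++ [(0 : Int)])) (m, [])).2]) hrow.1
    refine ⟨hs.1, ?_⟩
    rw [hs.2, hrow.2, List.append_assoc]
    rfl

theorem B_eq_mkTable (stones : List Int) :
    lastStoneWeightII_neighbor_alt stones = mkTable stones := by
  have H := outerB stones (PySem.List.pyRange 0 ((stones.length : Nat) : Int) 1)
    (fun k hk => (PySem.List.mem_pyRange_one.mp hk).1) PySem.Dict.empty []
    (memoInv_empty stones)
  show (_ : PySem.Dict (Int × Int) Int × List (List Int)).2 = mkTable stones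
  rw [H.2]
  unfold mkTable
  rw [PySem.List.pyRange_one]
  simp only [List.nil_append, List.map_map, Int.sub_zero, Int.toNat_natCast]
  apply List.map_congr_left
  intro a ha
  have ha' := List.mem_range.mp ha
  simp only [Function.comp, zero_add]
  apply List.map_congr_left
  intro b hb
  have hb' := List.mem_range.mp hb
  simp only [Function.comp_apply]
  by_cases hab : a ≤ b
  · rw [if_pos (by exact_mod_cast hab), if_pos hab]
    congr 1
    omega
  · rw [if_neg (by exact_mod_cast hab), if_neg hab]

-- ---------- A side ----------

def cellAt (st : List (List Int)) (i j : Nat) : Int := (st.getD i []).getD j 0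

def TblInv (stones : List Int) (d m : Nat) (st : List (List Int)) : Prop :=
  st.length = stones.length ∧ (∀ r ∈ st, r.length = stones.length) ∧
  ∀ i j : Nat, i < stones.length → j < stones.length →
    cellAt st i j =
      if i ≤ j ∧ (j - i < d ∨ (j - i = d ∧ i < m)) then fval stones (j - i) (i : Int) else 0

theorem cellAt_update (st : List (List Int)) (it jt : Nat) (v : Int)
    (hit : it < st.length) (hjt : jt < (st.getD it []).length) (i' j' : Nat) :
    cellAt (st.set it ((st.getD it []).set jt v)) i' j'
      = if i' = it ∧ j' = jt then v else cellAt st i' j' := by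
  unfold cellAt
  by_cases h1 : i' = it
  · subst h1
    have router : (st.set i' ((st.getD i' []).set jt v)).getD i' []
        = (st.getD i' []).set jt v := by
      rw [List.getD_eq_getElem?_getD, List.getElem?_set, if_pos rfl, if_pos hit]
      rfl
    rw [router]
    by_cases h2 : j' = jt
    · subst h2
      rw [List.getD_eq_getElem?_getD, List.getElem?_set, if_pos rfl, if_pos hjt]
      simp
    · have hrow : ((st.getD i' []).set jt v).getD j' 0 = (st.getD i' []).getD j' 0 := by
        rw [List.getD_eq_getElem?_getD, List.getElem?_set, if_neg (fun hh => h2 hh.symm),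
          ← List.getD_eq_getElem?_getD]
      rw [hrow, if_neg (fun hh => h2 hh.2)]
  · have router : (st.set it ((st.getD it []).set jt v)).getD i' [] = st.getD i' [] := by
      rw [List.getD_eq_getElem?_getD, List.getElem?_set, if_neg (fun hh => h1 hh.symm),
        ← List.getD_eq_getElem?_getD]
    rw [router, if_neg (fun hh => h1 hh.1)]

theorem rowlen_of_inv {stones : List Int} {d m : Nat} {st : List (List Int)}
    (h : TblInv stones d m st) {i : Nat} (hi : i < stones.length) :
    (st.getD i []).length = stones.length := by
  have hlen : i < st.length := by rw [h.1]; exact hi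
  rw [List.getD_eq_getElem?_getD, List.getElem?_eq_getElem hlen]
  exact h.2.1 _ (List.getElem_mem hlen)

theorem bodyA_step (stones : List Int) (d m : Nat) (hm : m + d < stones.length)
    {st : List (List Int)} (h : TblInv stones d m st) :
    TblInv stones d (m + 1) (pvBodyA stones (d : Int) st (m : Int)) := by
  obtain ⟨hL, hR, hC⟩ := h
  have hmN : m < stones.length := by omega
  have hrowlen := rowlen_of_inv ⟨hL, hR, hC⟩ hmN
  -- the value written into states[m][m+d] is fval d m
  have hval : (if (d : Int) = 0 then PySem.List.pyGetD stones (m : Int) 0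
      else pvMinFold ((PySem.List.pyRange (m : Int) ((m : Int) + (d : Int)) 1).map (fun k =>
        |PySem.List.pyGetD (st.getD m []) k 0 -
         PySem.List.pyGetD (PySem.List.pyGetD st (k + 1) []) ((m : Int) + (d : Int)) 0|)))
      = fval stones d (m : Int) := by
    by_cases hd : d = 0
    · subst hd
      simp [fval_zero]
    · rw [if_neg (by exact_mod_cast hd)]
      rw [fval_pyRange stones hd (m : Int)]
      congr 1
      apply List.map_congr_left
      intro k hk
      obtain ⟨hk1, hk2⟩ := PySem.List.mem_pyRange_one.mp hk
      have hk0 : 0 ≤ k := by omega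
      have t1 : PySem.List.pyGetD (st.getD m []) k 0
          = cellAt st m k.toNat := by
        unfold cellAt
        rw [PySem.List.pyGetD_of_nonneg _ (0 : Int) hk0]
      have t2 : PySem.List.pyGetD (PySem.List.pyGetD st (k + 1) []) ((m : Int) + (d : Int)) 0
          = cellAt st (k + 1).toNat (m + d) := by
        unfold cellAt
        rw [PySem.List.pyGetD_of_nonneg st [] (by omega),
          PySem.List.pyGetD_of_nonneg _ (0 : Int) (by omega),
          show ((m : Int) + (d : Int)).toNat = m + d from by omega]
      rw [t1, t2, hC m k.toNat hmN (by omega), hC (k + 1).toNat (m + d) (by omega) (by omega)]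
      rw [if_pos (by omega), if_pos (by omega)]
      have e1 : (k - (m : Int)).toNat = k.toNat - m := by omega
      have e2 : ((m : Int) + (d : Int) - k - 1).toNat = (m + d) - (k + 1).toNat := by omega
      have e3 : (((k + 1).toNat : Nat) : Int) = k + 1 := by omega
      rw [e1, e2, e3]
  -- now the update
  unfold pvBodyA
  rw [PySem.List.pySetD_of_nonneg st _ (by omega),
    PySem.List.pySetD_of_nonneg _ _ (by omega),
    PySem.List.pyGetD_of_nonneg st [] (by omega)]
  have em : ((m : Int)).toNat = m := by omega
  have emd : (((m : Int) + (d : Int))).toNat = m + d := by omega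
  rw [em, emd, hval]
  refine ⟨by rw [List.length_set]; exact hL, ?_, ?_⟩
  · intro r hr
    rcases List.mem_or_eq_of_mem_set hr with hr' | hr'
    · exact hR r hr'
    · rw [hr', List.length_set]
      rw [hrowlen]
  · intro i' j' hi' hj'
    rw [cellAt_update st m (m + d) _ (by omega) (by omega) i' j']
    by_cases hcase : i' = m ∧ j' = m + d
    · rw [if_pos hcase, if_pos (by omega)]
      rw [hcase.1, hcase.2]
      rw [show m + d - m = d by omega]
    · rw [if_neg hcase, hC i' j' hi' hj']
      by_cases hc2 : i' ≤ j' ∧ (j' - i' < d ∨ (j' - i' = d ∧ i' < m))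
      · rw [if_pos hc2, if_pos (by omega)]
      · rw [if_neg hc2, if_neg (by omega)]

theorem innerA (stones : List Int) (d : Nat) (hd : d ≤ stones.length) :
    ∀ m : Nat, m ≤ stones.length - d → ∀ st : List (List Int), TblInv stones d m st →
      TblInv stones d (stones.length - d)
        ((PySem.List.pyRange (m : Int) ((stones.length : Int) - (d : Int)) 1).foldl
          (pvBodyA stones (d : Int)) st) := by
  suffices H : ∀ n m : Nat, stones.length - d - m = n → m ≤ stones.length - d →
      ∀ st : List (List Int), TblInv stones d m st →
      TblInv stones d (stones.length - d)
        ((PySem.List.pyRange (m : Int) ((stones.length : Int) - (d : Int)) 1).foldl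
          (pvBodyA stones (d : Int)) st) by
    exact fun m hm st h => H _ m rfl hm st h
  intro n
  induction n with
  | zero =>
    intro m hn hm st h
    have hm' : m = stones.length - d := by omega
    rw [PySem.List.pyRange_one_eq_nil (by omega)]
    rw [← hm']
    exact h
  | succ n ihn =>
    intro m hn hm st h
    rw [PySem.List.pyRange_one_cons (by omega), List.foldl_cons]
    have hstep := bodyA_step stones d m (by omega) h
    have : ((m : Int) + 1) = (((m + 1 : Nat)) : Int) := by omega
    rw [this]
    exact ihn (m + 1) (by omega) (by omega) _ hstep

theorem shiftInv (stones : List Int) (d : Nat) {st : List (List Int)}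
    (h : TblInv stones d (stones.length - d) st) : TblInv stones (d + 1) 0 st := by
  obtain ⟨hL, hR, hC⟩ := h
  refine ⟨hL, hR, ?_⟩
  intro i j hi hj
  rw [hC i j hi hj]
  by_cases hc : i ≤ j ∧ (j - i < d ∨ (j - i = d ∧ i < stones.length - d))
  · rw [if_pos hc, if_pos (by omega)]
  · rw [if_neg hc, if_neg (by omega)]

theorem outerA (stones : List Int) :
    ∀ d : Nat, d ≤ stones.length → ∀ st : List (List Int), TblInv stones d 0 st →
      TblInv stones stones.length 0
        ((PySem.List.pyRange (d : Int) (stones.length : Int) 1).foldl (pvOuterA stones) st) := by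
  suffices H : ∀ n d : Nat, stones.length - d = n → d ≤ stones.length →
      ∀ st : List (List Int), TblInv stones d 0 st →
      TblInv stones stones.length 0
        ((PySem.List.pyRange (d : Int) (stones.length : Int) 1).foldl (pvOuterA stones) st) by
    exact fun d hd st h => H _ d rfl hd st h
  intro n
  induction n with
  | zero =>
    intro d hn hd st h
    rw [PySem.List.pyRange_one_eq_nil (by omega)]
    have : d = stones.length := by omega
    rw [← this]
    exact h
  | succ n ihn =>
    intro d hn hd st h
    rw [PySem.List.pyRange_one_cons (by omega), List.foldl_cons]
    have hstep : TblInv stones (d + 1) 0 (pvOuterA stones st (d : Int)) := by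
      apply shiftInv
      have := innerA stones d hd 0 (by omega) st h
      unfold pvOuterA
      simpa using this
    have : ((d : Int) + 1) = (((d + 1 : Nat)) : Int) := by omega
    rw [this]
    exact ihn (d + 1) (by omega) (by omega) _ hstep

theorem init_inv (stones : List Int) :
    TblInv stones 0 0
      (List.replicate stones.length (List.replicate stones.length (0 : Int))) := by
  refine ⟨by simp, ?_, ?_⟩
  · intro r hr
    rw [List.eq_of_mem_replicate hr]
    simp
  · intro i j hi hj
    unfold cellAt
    rw [List.getD_replicate _ hi, List.getD_replicate _ hj, if_neg (by omega)]

theorem A_eq_mkTable (stones : List Int) :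
    lastStoneWeightII_neighbor stones = mkTable stones := by
  have H := outerA stones 0 (by omega) _ (init_inv stones)
  have h0 : (((0 : Nat)) : Int) = 0 := by simp
  rw [h0] at H
  have hunfold : lastStoneWeightII_neighbor stones
      = (PySem.List.pyRange 0 (stones.length : Int) 1).foldl (pvOuterA stones)
        (List.replicate stones.length (List.replicate stones.length (0 : Int))) := rfl
  rw [hunfold]
  generalize hT : (PySem.List.pyRange 0 (stones.length : Int) 1).foldl (pvOuterA stones)
      (List.replicate stones.length (List.replicate stones.length (0 : Int))) = T at H ⊢
  obtain ⟨hL, hR, hC⟩ := H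
  apply List.ext_getElem
  · rw [hL]; unfold mkTable; simp
  · intro i h1 h2
    apply List.ext_getElem
    · rw [hR _ (List.getElem_mem h1)]
      unfold mkTable
      simp
    · intro j hj1 hj2
      have hiN : i < stones.length := by
        have := h1; rwa [hL] at this
      have hjN : j < stones.length := by
        have := hj1
        rwa [hR _ (List.getElem_mem h1)] at this
      have hcell : cellAt T i j = T[i][j] := by
        have hrow : T.getD i [] = T[i] := by
          rw [List.getD_eq_getElem?_getD, List.getElem?_eq_getElem h1]
          rfl
        unfold cellAt
        rw [hrow, List.getD_eq_getElem?_getD, List.getElem?_eq_getElem hj1]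
        rfl
      rw [← hcell, hC i j hiN hjN]
      unfold mkTable
      simp only [List.getElem_map, List.getElem_range]
      by_cases hij : i ≤ j
      · rw [if_pos (by omega), if_pos hij]
      · rw [if_neg (by omega), if_neg hij]

-- ===== VERDICT (by name: the statement is the Claim_ definition above) =====
theorem lastStoneWeightII_neighbor_spec : Claim_equal_lastStoneWeightII_neighbor := by
  intro stones _
  unfold Spec_lastStoneWeightII_neighbor
  rw [A_eq_mkTable, B_eq_mkTable]
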